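-- pv_equiv track=rewrite | github.com/inkedpad/MMM_Robyn_Pyspark | Robyn_pyspark_innerfolder/Codes/preprocessing/functions/V2_date_time.py | normalize_frequency
-- ===== SOURCE A (Python) =====
-- FREQ_ALIASES = {
--     "D":     {"d", "day", "daily"},
--     "W-SUN": {"w", "week", "weekly"},
--     "M":     {"m", "month", "monthly"},
--     "Q":     {"a", "quarter", "quartely", "quart"}
-- }
--
-- def normalize_frequency(freq: str) -> str:
--     if not isinstance(freq, str):
--         raise ValueError("Frequency must be a string")
--
--     freq_clean = freq.strip().lower()
--
--     for canonical, aliases in FREQ_ALIASES.items():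
--         if freq_clean == canonical.lower() or freq_clean in aliases:
--             return canonical
--
--     raise ValueError(
--         f"Invalid frequency '{freq}'. "
--         f"Allowed values: daily, weekly, monthly"
--     )
-- ===== SOURCE B (Python) =====
-- # B: one flat reverse-lookup dict (alias or lowercased canonical -> canonical code); no loop over FREQ_ALIASES.
-- _REVERSE = {
--     "d": "D", "day": "D", "daily": "D",
--     "w-sun": "W-SUN", "w": "W-SUN", "week": "W-SUN", "weekly": "W-SUN",
--     "m": "M", "month": "M", "monthly": "M",
--     "q": "Q", "a": "Q", "quarter": "Q", "quartely": "Q", "quart": "Q",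
-- }
--
-- def normalize_frequency(freq: str) -> str:
--     if not isinstance(freq, str):
--         raise ValueError("Frequency must be a string")
--     code = _REVERSE.get(freq.strip().lower())
--     if code is None:
--         raise ValueError(
--             f"Invalid frequency '{freq}'. "
--             f"Allowed values: daily, weekly, monthly"
--         )
--     return code
-- ===== Notes on version B (the rewrite author's own statement) =====
-- stated objective: idiomatic
-- what changed: Replaced the per-call loop over FREQ_ALIASES (testing the lowered canonical key and an alias set each iteration) by a single module-level flat reverse dict from every alias and lowered canonical key to its code, so the function does one dict lookup.
import Mathlib
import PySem

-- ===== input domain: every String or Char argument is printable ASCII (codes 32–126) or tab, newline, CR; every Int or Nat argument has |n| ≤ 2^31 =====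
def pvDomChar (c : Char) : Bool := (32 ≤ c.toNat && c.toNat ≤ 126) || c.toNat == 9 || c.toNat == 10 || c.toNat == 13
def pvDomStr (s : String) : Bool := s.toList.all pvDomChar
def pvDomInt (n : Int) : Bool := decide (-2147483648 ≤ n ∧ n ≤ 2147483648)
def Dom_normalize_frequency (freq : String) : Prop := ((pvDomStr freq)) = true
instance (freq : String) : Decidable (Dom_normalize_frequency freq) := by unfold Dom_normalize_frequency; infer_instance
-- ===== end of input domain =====

-- B replaces A's per-call loop over FREQ_ALIASES by one flat module-level reverse dict lookup (idiomatic).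
-- A raises ValueError on strings whose stripped/lowered form is not a known alias; those inputs are outside Pre_.

-- ===== PORT A =====
-- FREQ_ALIASES: dict canonical -> set of aliases (alias sets are literal, distinct elements; membership only).
def pvFreqAliases : List (String × List String) :=
  [("D", ["d", "day", "daily"]),
   ("W-SUN", ["w", "week", "weekly"]),
   ("M", ["m", "month", "monthly"]),
   ("Q", ["a", "quarter", "quartely", "quart"])]

-- the 'for canonical, aliases in FREQ_ALIASES.items()' loop; [] = the final 'raise ValueError' (excluded by Pre_)
def pvALoop (c : String) : List (String × List String) → String
  | [] => ""
  | (canonical, aliases) :: rest =>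
      if c == PySem.Str.lower canonical || aliases.contains c then canonical
      else pvALoop c rest

def normalize_frequency (freq : String) : String :=
  pvALoop (PySem.Str.lower (PySem.Str.strip freq)) pvFreqAliases

-- ===== PORT B =====
def pvReverse : PySem.Dict String String := PySem.Dict.ofList
  [("d", "D"), ("day", "D"), ("daily", "D"),
   ("w-sun", "W-SUN"), ("w", "W-SUN"), ("week", "W-SUN"), ("weekly", "W-SUN"),
   ("m", "M"), ("month", "M"), ("monthly", "M"),
   ("q", "Q"), ("a", "Q"), ("quarter", "Q"), ("quartely", "Q"), ("quart", "Q")]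

-- _REVERSE.get(...); none = the 'raise ValueError' branch (excluded by Pre_)
def normalize_frequency_alt (freq : String) : String :=
  (PySem.Dict.get? pvReverse (PySem.Str.lower (PySem.Str.strip freq))).getD ""

-- ===== PRECONDITION & SPEC =====
-- Pre_: the stripped, lowercased input is a known alias or lowered canonical key; elsewhere A raises ValueError.
def Pre_normalize_frequency (freq : String) : Prop :=
  PySem.Str.lower (PySem.Str.strip freq) ∈
    (["d", "day", "daily", "w-sun", "w", "week", "weekly",
      "m", "month", "monthly", "q", "a", "quarter", "quartely", "quart"] : List String)
instance (freq : String) : Decidable (Pre_normalize_frequency freq) := by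
  unfold Pre_normalize_frequency; infer_instance

def pvWitness_normalize_frequency : String := " Weekly "

def Spec_normalize_frequency (freq : String) (out : String) : Prop := out = normalize_frequency_alt freq
instance (freq : String) (out : String) : Decidable (Spec_normalize_frequency freq out) := by unfold Spec_normalize_frequency; infer_instance

-- ===== CLAIM (what is proved, stated in full; the proofs are below) =====
def Claim_equal_normalize_frequency : Prop := ∀ (freq : String), Dom_normalize_frequency freq → Pre_normalize_frequency freq → Spec_normalize_frequency freq (normalize_frequency freq)

-- ===== LEMMAS AND PROOFS =====
-- Both ports are functions of the cleaned string c alone; on each of the 15 admitted values of c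
-- the loop and the dict lookup yield the same canonical code (checked by 'decide').
theorem pvTable_agree (c : String)
    (h : c ∈ (["d", "day", "daily", "w-sun", "w", "week", "weekly",
      "m", "month", "monthly", "q", "a", "quarter", "quartely", "quart"] : List String)) :
    pvALoop c pvFreqAliases = (PySem.Dict.get? pvReverse c).getD "" := by
  fin_cases h <;> decide

-- ===== VERDICT (by name: the statement is the Claim_ definition above) =====
theorem normalize_frequency_spec : Claim_equal_normalize_frequency := by
  intro freq _ hpre
  unfold Spec_normalize_frequency normalize_frequency normalize_frequency_alt
  exact pvTable_agree _ hpre
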